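-- pv_equiv track=rewrite | github.com/bibersay/Algorithm | programmers/60248_fine rectangle.py | solution
-- ===== SOURCE A (Python) =====
-- def solution(w, h):
--     if w == h:
--         return w * h - w
--     larger = max(w, h)
--     smaller = min(w, h)
--     while larger and smaller:
--         smaller,larger = larger % smaller, smaller
--     gcd = larger
--
--     return w*h - (w+h-gcd)
-- ===== SOURCE B (Python) =====
-- def solution(w, h):
--     def g(a, b):
--         return a if (a == 0 or b == 0) else g(b, a % b)
--     return w * h - w - h + g(max(w, h), min(w, h))
-- ===== Notes on version B (the rewrite author's own statement) =====
-- stated objective: simpler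
-- what changed: Replaced the while-loop Euclid with a recursive gcd helper and dropped the redundant w==h special case, returning the single closed formula w*h - w - h + g directly.
import Mathlib
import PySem

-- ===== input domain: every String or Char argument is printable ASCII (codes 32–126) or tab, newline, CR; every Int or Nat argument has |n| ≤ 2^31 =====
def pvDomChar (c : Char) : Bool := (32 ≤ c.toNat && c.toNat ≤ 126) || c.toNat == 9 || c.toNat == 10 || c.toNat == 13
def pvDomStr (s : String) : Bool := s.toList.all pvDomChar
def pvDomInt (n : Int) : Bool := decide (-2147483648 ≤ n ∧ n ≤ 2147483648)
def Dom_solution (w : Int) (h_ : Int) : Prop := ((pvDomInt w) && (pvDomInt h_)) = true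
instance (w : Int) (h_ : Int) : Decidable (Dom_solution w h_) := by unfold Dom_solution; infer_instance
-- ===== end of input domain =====

-- B replaces A's while-loop Euclid and its redundant w==h shortcut by one recursive
-- gcd helper and a single closed formula (objective: simpler).

-- Python's % has the divisor's sign and |a % b| < |b| for b ≠ 0 (used for termination).
theorem pv_mod_natAbs_lt (a b : Int) (hb : b ≠ 0) :
    (PySem.Int.mod a b).natAbs < b.natAbs := by
  rcases lt_or_gt_of_ne hb with h | h
  · have := PySem.Int.mod_neg_bounds a (b := b) h
    omega
  · have h1 := PySem.Int.mod_nonneg a (b := b) h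
    have h2 := PySem.Int.mod_lt a (b := b) h
    omega

-- ===== PORT A =====
-- A's while loop: state (larger, smaller); one step is smaller,larger = larger % smaller, smaller.
def solLoop (larger smaller : Int) : Int :=
  if h : larger ≠ 0 ∧ smaller ≠ 0 then
    solLoop smaller (PySem.Int.mod larger smaller)
  else larger
termination_by smaller.natAbs
decreasing_by exact pv_mod_natAbs_lt larger smaller h.2

def solution (w : Int) (h_ : Int) : Int :=
  if w = h_ then w * h_ - w
  else
    let larger := max w h_
    let smaller := min w h_
    let gcd := solLoop larger smaller
    w * h_ - (w + h_ - gcd)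

-- ===== PORT B =====
def altG (a b : Int) : Int :=
  if h : a = 0 ∨ b = 0 then a
  else altG b (PySem.Int.mod a b)
termination_by b.natAbs
decreasing_by exact pv_mod_natAbs_lt a b (by tauto)

def solution_alt (w : Int) (h_ : Int) : Int :=
  w * h_ - w - h_ + altG (max w h_) (min w h_)

-- ===== PRECONDITION & SPEC =====
def Spec_solution (w : Int) (h_ : Int) (out : Int) : Prop := out = solution_alt w h_
instance (w : Int) (h_ : Int) (out : Int) : Decidable (Spec_solution w h_ out) := by unfold Spec_solution; infer_instance

-- ===== CLAIM (what is proved, stated in full; the proofs are below) =====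
def Claim_equal_solution : Prop := ∀ (w : Int) (h_ : Int), Dom_solution w h_ → Spec_solution w h_ (solution w h_)

-- ===== LEMMAS AND PROOFS =====

-- A's loop and B's recursive helper are the same Euclidean recurrence.
theorem solLoop_eq_altG (a b : Int) : solLoop a b = altG a b := by
  induction a, b using solLoop.induct with
  | case1 a b h ih =>
    rw [solLoop, altG, dif_pos h, dif_neg (by tauto)]
    exact ih
  | case2 a b h =>
    rw [solLoop, altG, dif_neg h, dif_pos (by tauto)]

theorem altG_self (w : Int) : altG w w = if w = 0 then 0 else w := by
  by_cases h : w = 0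
  · simp [altG, h]
  · rw [if_neg h, altG, dif_neg (by tauto)]
    have hm : PySem.Int.mod w w = 0 := (PySem.Int.mod_eq_zero_iff_dvd w w).2 dvd_rfl
    rw [hm, altG, dif_pos (Or.inr rfl)]

-- ===== VERDICT (by name: the statement is the Claim_ definition above) =====
theorem solution_spec : Claim_equal_solution := by
  intro w h_ _
  unfold Spec_solution solution solution_alt
  by_cases hw : w = h_
  · subst hw
    rw [if_pos rfl, max_self, min_self, altG_self]
    by_cases h0 : w = 0
    · simp [h0]
    · rw [if_neg h0]; ring
  · rw [if_neg hw]
    simp only [solLoop_eq_altG]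
    ring
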